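-- pv_equiv track=rewrite | github.com/In-Network-Machine-Learning/Planter | src/functions/Range_to_LPM.py | Table_to_sep_val
-- ===== SOURCE A (Python) =====
-- def Table_to_sep_val(table):
--     separation_value_input = list(table.keys())
--     Table={} # Create an empty array called 'table', to fill
--     initial = sorted(separation_value_input, reverse=True)[0] # Select the separation value with the highest value
--     for dict in sorted(separation_value_input, reverse=True): # For each separation value in descending order
--         if dict == initial: #If the separation value is the first (and highest value key)
--             Table[dict] = table[dict]
--             lasat_lable = table[dict]
--         if table[dict] != lasat_lable:
--             Table[dict] = table[dict]
--             lasat_lable = table[dict]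
--         if dict == 0:
--             Table[dict] = table[dict] # When you get to the end of the for loop, the last value in table and final key is 0
--     #This for-loop selects all feature values at bounderies and puts them in Table
--     #For instance if the first 20 actions of the exact match table were 112111112111211121111121 then Table would be 1121212121 in reverse order
--     #Selects the value before the value change
--
--     separation_value = list(Table.keys()) #Selects index of seperation values (starting from highest e.g 99,98,86,77,56,29,6,1)
--
--     return separation_value, separation_value_input
-- ===== SOURCE B (Python) =====
-- def Table_to_sep_val(table):
--     separation_value_input = list(table.keys())
--     desc = sorted(separation_value_input, reverse=True)
--     labels = [table[k] for k in desc]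
--     separation_value = [desc[0]] + [k for prev, cur, k in zip(labels, labels[1:], desc[1:])
--                                     if cur != prev or k == 0]
--     return separation_value, separation_value_input
-- ===== Notes on version B (the rewrite author's own statement) =====
-- stated objective: idiomatic
-- what changed: Replaces A's dict-building loop with mutable last-label state and three sequential ifs by a single pairwise comparison: zip the descending key list with its own label list shifted by one and keep each key whose label differs from its predecessor's (or which is 0), so no intermediate dict and no carried state are needed; the list is also sorted once instead of twice.
import Mathlib
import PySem

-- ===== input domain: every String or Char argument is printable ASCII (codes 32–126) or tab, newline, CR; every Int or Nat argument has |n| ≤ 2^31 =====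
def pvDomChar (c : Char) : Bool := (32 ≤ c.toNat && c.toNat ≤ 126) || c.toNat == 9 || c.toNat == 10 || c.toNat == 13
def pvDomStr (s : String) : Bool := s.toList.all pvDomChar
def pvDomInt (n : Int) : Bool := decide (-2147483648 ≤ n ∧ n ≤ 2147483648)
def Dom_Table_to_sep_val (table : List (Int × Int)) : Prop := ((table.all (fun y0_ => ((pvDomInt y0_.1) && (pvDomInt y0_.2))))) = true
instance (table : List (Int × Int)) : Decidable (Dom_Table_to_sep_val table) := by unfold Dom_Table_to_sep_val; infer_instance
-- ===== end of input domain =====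

-- B replaces A's dict-building loop with carried last-label state by a single
-- pairwise zip/filter over the descending key list (idiomatic; same cost).


-- ===== PORT A =====
def Table_to_sep_val (table : List (Int × Int)) : List Int × List Int :=
  let svi : List Int := PySem.Set.ofList (table.map (·.1))          -- list(table.keys())
  let desc := PySem.List.sorted svi (fun k => k) true               -- sorted(..., reverse=True)
  match PySem.List.pyGet? desc 0 with                               -- [0]: IndexError on empty → Pre_
  | none => ([], svi)
  | some initial =>
    let res := desc.foldl (fun (st : PySem.Dict Int Int × Int) k =>
      let v := PySem.Dict.getD (PySem.Dict.mk table) k 0            -- table[dict] (k is always a key)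
      let st := if k == initial then (st.1.insert k v, v) else st
      let st := if v != st.2 then (st.1.insert k v, v) else st
      let st := if k == 0 then (st.1.insert k v, st.2) else st
      st) (PySem.Dict.empty, 0)                                     -- lasat_lable unbound: read only after first set
    (PySem.Dict.keys res.1, svi)

-- ===== PORT B =====
def Table_to_sep_val_alt (table : List (Int × Int)) : List Int × List Int :=
  let keys : List Int := PySem.Set.ofList (table.map (·.1))
  let desc := PySem.List.sorted keys (fun k => k) true
  let labels := desc.map (fun k => PySem.Dict.getD (PySem.Dict.mk table) k 0)
  match PySem.List.pyGet? desc 0 with                               -- desc[0]: IndexError on empty → Pre_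
  | none => ([], keys)
  | some h =>
    let sep := h :: (((labels.zip (labels.drop 1)).zip (desc.drop 1)).filterMap
        (fun pc => if pc.1.2 ≠ pc.1.1 ∨ pc.2 = 0 then some pc.2 else none))
    (sep, keys)

-- ===== PRECONDITION & SPEC =====
-- Pre_ excludes the empty table, on which both A and B raise IndexError.
def Pre_Table_to_sep_val (table : List (Int × Int)) : Prop := table ≠ []
instance (table : List (Int × Int)) : Decidable (Pre_Table_to_sep_val table) := by unfold Pre_Table_to_sep_val; infer_instance
def pvWitness_Table_to_sep_val : (List (Int × Int)) := [(3, 1), (2, 1), (1, 2), (0, 2)]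
def Spec_Table_to_sep_val (table : List (Int × Int)) (out : List Int × List Int) : Prop := out = Table_to_sep_val_alt table
instance (table : List (Int × Int)) (out : List Int × List Int) : Decidable (Spec_Table_to_sep_val table out) := by unfold Spec_Table_to_sep_val; infer_instance

-- ===== CLAIM (what is proved, stated in full; the proofs are below) =====
def Claim_equal_Table_to_sep_val : Prop := ∀ (table : List (Int × Int)), Dom_Table_to_sep_val table → Pre_Table_to_sep_val table → Spec_Table_to_sep_val table (Table_to_sep_val table)

-- ===== LEMMAS AND PROOFS =====

-- the label of key k in table
def pvLab (table : List (Int × Int)) (k : Int) : Int := PySem.Dict.getD (PySem.Dict.mk table) k 0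

-- the selected boundary keys after the first, as a recursion carrying the previous label
def pvSel (table : List (Int × Int)) (las : Int) : List Int → List Int
  | [] => []
  | k :: r =>
      (if pvLab table k ≠ las ∨ k = 0 then [k] else []) ++ pvSel table (pvLab table k) r

theorem pvSel_zip (table : List (Int × Int)) (t : List Int) : ∀ (p : Int),
    ((((p :: t.map (pvLab table)).zip (t.map (pvLab table))).zip t).filterMap
      (fun pc => if pc.1.2 ≠ pc.1.1 ∨ pc.2 = 0 then some pc.2 else none))
    = pvSel table p t := by
  induction t with
  | nil => intro p; rfl
  | cons k r ih =>
      intro p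
      simp only [List.map_cons, List.zip_cons_cons, List.filterMap_cons, pvSel]
      rw [ih (pvLab table k)]
      by_cases h : pvLab table k ≠ p ∨ k = 0 <;> simp [h]

theorem pvA_loop (table : List (Int × Int)) (initial : Int) :
    ∀ (l : List Int) (T : PySem.Dict Int Int) (las : Int),
    l.Nodup → initial ∉ l → (∀ k ∈ l, T.contains k = false) →
    (l.foldl (fun (st : PySem.Dict Int Int × Int) k =>
      let v := PySem.Dict.getD (PySem.Dict.mk table) k 0
      let st := if k == initial then (st.1.insert k v, v) else st
      let st := if v != st.2 then (st.1.insert k v, v) else st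
      let st := if k == 0 then (st.1.insert k v, st.2) else st
      st) (T, las)).1.keys = T.keys ++ pvSel table las l := by
  intro l
  induction l with
  | nil => intro T las _ _ _; simp [pvSel]
  | cons k r ih =>
      intro T las hnd hini hfresh
      obtain ⟨hknr, hrnd⟩ := List.nodup_cons.mp hnd
      have hkini : (k == initial) = false := by
        simp only [beq_eq_false_iff_ne]; intro h; exact hini (h ▸ List.mem_cons_self)
      have hinir : initial ∉ r := fun h => hini (List.mem_cons_of_mem _ h)
      have hkT : T.contains k = false := hfresh k List.mem_cons_self
      simp only [List.foldl_cons, hkini, Bool.false_eq_true, if_false]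
      set v := PySem.Dict.getD (PySem.Dict.mk table) k 0 with hv
      have hfr0 : ∀ j ∈ r, T.contains j = false :=
        fun j hj => hfresh j (List.mem_cons_of_mem _ hj)
      have hjk : ∀ j ∈ r, (j == k) = false := by
        intro j hj; simp only [beq_eq_false_iff_ne]; intro h; exact hknr (h ▸ hj)
      have hfr1 : ∀ j ∈ r, (T.insert k v).contains j = false := by
        intro j hj
        rw [PySem.Dict.contains_insert]
        simp [hjk j hj, hfr0 j hj]
      have hfr2 : ∀ j ∈ r, ((T.insert k v).insert k v).contains j = false := by
        intro j hj
        rw [PySem.Dict.contains_insert]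
        simp [hjk j hj, hfr1 j hj]
      have hkey1 : (T.insert k v).keys = T.keys ++ [k] :=
        PySem.Dict.keys_insert_of_not_contains T v hkT
      by_cases hdif : v ≠ las
      · have h2 : (v != las) = true := by simp [hdif]
        simp only [h2, if_true]
        by_cases h0 : k = 0
        · subst h0
          have hkey2 : ((T.insert 0 v).insert 0 v).keys = (T.insert 0 v).keys :=
            PySem.Dict.keys_insert_of_contains (T.insert 0 v) v
              (PySem.Dict.contains_insert_self T 0 v)
          simp only [beq_self_eq_true, if_true]
          rw [ih _ _ hrnd hinir hfr2, hkey2, hkey1]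
          simp [pvSel, pvLab, ← hv]
        · have h0b : (k == 0) = false := by simp [h0]
          simp only [h0b, Bool.false_eq_true, if_false]
          rw [ih _ _ hrnd hinir hfr1, hkey1]
          simp [pvSel, pvLab, ← hv, hdif, h0]
      · rw [not_ne_iff] at hdif
        have h2 : (v != las) = false := by simp [hdif]
        simp only [h2, Bool.false_eq_true, if_false]
        by_cases h0 : k = 0
        · subst h0
          simp only [beq_self_eq_true, if_true]
          rw [ih _ _ hrnd hinir hfr1, hkey1]
          simp [pvSel, pvLab, ← hv, hdif]
        · have h0b : (k == 0) = false := by simp [h0]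
          simp only [h0b, Bool.false_eq_true, if_false]
          rw [ih _ _ hrnd hinir hfr0]
          simp [pvSel, pvLab, ← hv, hdif, h0]

-- ===== VERDICT (by name: the statement is the Claim_ definition above) =====
theorem Table_to_sep_val_spec : Claim_equal_Table_to_sep_val := by
  intro table _ hpre
  unfold Spec_Table_to_sep_val Table_to_sep_val Table_to_sep_val_alt
  have hfun : (fun k => PySem.Dict.getD (PySem.Dict.mk table) k 0) = pvLab table := by
    funext k; rfl
  have hnd0 : (PySem.Set.ofList (table.map (·.1))).Nodup := PySem.Set.nodup_ofList _
  cases hsort : PySem.List.sorted (PySem.Set.ofList (table.map (·.1))) (fun k => k) true with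
  | nil => simp [hsort, PySem.List.pyGet?, PySem.List.pyIdx?]
  | cons initial t =>
    have hnd : (initial :: t).Nodup := by
      rw [← hsort]
      exact (PySem.List.sorted_perm _ _ _).symm.nodup hnd0
    obtain ⟨hit, htnd⟩ := List.nodup_cons.mp hnd
    have hget : PySem.List.pyGet? (initial :: t) (0 : Int) = some initial := by
      simp [PySem.List.pyGet?, PySem.List.pyIdx?]
    simp only [hsort, hget, List.map_cons, List.drop_succ_cons,
      List.drop_zero, hfun, List.foldl_cons]
    simp only [beq_self_eq_true, if_true, bne_self_eq_false, Bool.false_eq_true, if_false]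
    have hfr : ∀ j ∈ t,
        ((PySem.Dict.empty : PySem.Dict Int Int).insert initial
          (PySem.Dict.getD (PySem.Dict.mk table) initial 0)).contains j = false := by
      intro j hj
      rw [PySem.Dict.contains_insert]
      have hji : (j == initial) = false := by
        simp only [beq_eq_false_iff_ne]; intro h; exact hit (h ▸ hj)
      simp [hji, PySem.Dict.contains_empty]
    have hkey1 : ((PySem.Dict.empty : PySem.Dict Int Int).insert initial
        (PySem.Dict.getD (PySem.Dict.mk table) initial 0)).keys = [initial] := by
      rw [PySem.Dict.keys_insert_of_not_contains PySem.Dict.empty _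
        (by simp [PySem.Dict.contains_empty])]
      simp [PySem.Dict.keys_empty]
    by_cases hi0 : initial = 0
    · subst hi0
      simp only [beq_self_eq_true, if_true]
      have hfr2 : ∀ j ∈ t,
          (((PySem.Dict.empty : PySem.Dict Int Int).insert 0
              (PySem.Dict.getD (PySem.Dict.mk table) 0 0)).insert 0
              (PySem.Dict.getD (PySem.Dict.mk table) 0 0)).contains j = false := by
        intro j hj
        rw [PySem.Dict.contains_insert]
        have hji : (j == (0:Int)) = false := by
          simp only [beq_eq_false_iff_ne]; intro h; exact hit (h ▸ hj)
        simp [hji, hfr j hj]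
      rw [pvA_loop table 0 t _ _ htnd hit hfr2,
        PySem.Dict.keys_insert_of_contains _ _ (PySem.Dict.contains_insert_self _ _ _),
        hkey1, pvSel_zip table t _]
      rfl
    · have hi0b : ((initial : Int) == 0) = false := by simp [hi0]
      simp only [hi0b, Bool.false_eq_true, if_false]
      rw [pvA_loop table initial t _ _ htnd hit hfr, hkey1, pvSel_zip table t _]
      rfl
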